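-- pv_equiv track=rewrite | github.com/danieleschmidt/protein-diffusion-design-lab | src/protein_diffusion/revolutionary_research_framework.py | _create_consensus_sequence
-- ===== SOURCE A (Python) =====
-- from typing import Dict, List, Any, Optional, Callable, Union, Tuple, Set
-- from collections import defaultdict, deque
--
-- def _create_consensus_sequence(sequences: List[str]) -> str:
--     """Create consensus sequence from multiple designs."""
--
--     if not sequences:
--         return ""
--
--     # Find common length
--     min_length = min(len(seq) for seq in sequences)
--
--     consensus = ""
--     for position in range(min_length):
--         # Get amino acid at this position from each sequence
--         position_aas = [seq[position] for seq in sequences]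
--
--         # Find most common amino acid
--         aa_counts = defaultdict(int)
--         for aa in position_aas:
--             aa_counts[aa] += 1
--
--         most_common_aa = max(aa_counts.keys(), key=lambda k: aa_counts[k])
--         consensus += most_common_aa
--
--     return consensus
-- ===== SOURCE B (Python) =====
-- def _create_consensus_sequence(sequences):
--     """Create consensus sequence from multiple designs."""
--     if not sequences:
--         return ""
--     min_length = min(len(seq) for seq in sequences)
--     # One table row per position; fill it row-major (sequence by sequence).
--     counts = [{} for _ in range(min_length)]
--     for seq in sequences:
--         for d, c in zip(counts, seq):
--             d[c] = d.get(c, 0) + 1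
--     # Extraction pass: first-maximal key per position (dict insertion order).
--     return "".join(max(d, key=d.get) for d in counts)
-- ===== Notes on version B (the rewrite author's own statement) =====
-- stated objective: alternative
-- what changed: Interchanges the loop nesting: instead of scanning all sequences once per position (column-major with an inline per-position counter), B makes one row-major pass filling a per-position table of count dicts via zip, then a second extraction pass joins the first-maximal key of each dict.
import Mathlib
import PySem

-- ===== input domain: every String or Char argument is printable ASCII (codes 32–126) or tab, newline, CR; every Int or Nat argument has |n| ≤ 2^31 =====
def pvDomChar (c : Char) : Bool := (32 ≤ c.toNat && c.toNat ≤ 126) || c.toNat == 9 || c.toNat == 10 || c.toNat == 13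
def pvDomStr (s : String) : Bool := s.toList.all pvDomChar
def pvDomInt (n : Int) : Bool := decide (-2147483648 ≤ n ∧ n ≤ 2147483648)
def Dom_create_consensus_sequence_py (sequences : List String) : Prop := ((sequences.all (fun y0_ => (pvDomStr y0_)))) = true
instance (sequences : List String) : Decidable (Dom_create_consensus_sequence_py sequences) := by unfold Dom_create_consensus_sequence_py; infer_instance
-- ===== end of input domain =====

-- B swaps the loop nesting: a row-major pass fills a per-position count table, a second pass extracts
-- the first-maximal key per position (objective: alternative decomposition, same asymptotic cost).

-- ===== PORT A =====
-- seq[position]: position < min_length ≤ seq.length always holds here, so getD's default is unreachable.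
def create_consensus_sequence_py (sequences : List String) : String :=
  if sequences = [] then "" else
  let min_length := (PySem.List.min? (sequences.map (fun s => s.toList.length)) (fun x => x)).getD 0
  let consensus := (List.range min_length).foldl (fun acc position =>
      let position_aas := sequences.map (fun seq => seq.toList.getD position ' ')
      let aa_counts := position_aas.foldl (fun d aa => d.modify aa 0 (· + 1)) (PySem.Dict.empty : PySem.Dict Char Int)
      acc ++ [(PySem.List.max? aa_counts.keys (fun k => aa_counts.getD k 0)).getD ' ']) ([] : List Char)
  String.mk consensus

-- ===== PORT B =====
-- inner loop 'for d, c in zip(counts, seq): d[c] = d.get(c, 0) + 1': simultaneous (zip-truncating) walk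
def bumpRow (d : PySem.Dict Char Int) (c : Char) : PySem.Dict Char Int :=
  d.insert c (d.getD c 0 + 1)

def bumpTable : List (PySem.Dict Char Int) → List Char → List (PySem.Dict Char Int)
  | [], _ => []
  | ds, [] => ds
  | d :: ds, c :: cs => bumpRow d c :: bumpTable ds cs

def create_consensus_sequence_py_alt (sequences : List String) : String :=
  match sequences with
  | [] => ""
  | _ :: _ =>
    let min_length := (PySem.List.min? (sequences.map (fun s => s.toList.length)) (fun x => x)).getD 0
    let counts := sequences.foldl (fun tbl seq => bumpTable tbl seq.toList)
                    (List.replicate min_length PySem.Dict.empty)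
    String.mk (counts.map (fun d => (PySem.List.max? d.keys (fun k => d.getD k 0)).getD ' '))

-- ===== PRECONDITION & SPEC =====
def Spec_create_consensus_sequence_py (sequences : List String) (out : String) : Prop := out = create_consensus_sequence_py_alt sequences
instance (sequences : List String) (out : String) : Decidable (Spec_create_consensus_sequence_py sequences out) := by unfold Spec_create_consensus_sequence_py; infer_instance

-- ===== CLAIM (what is proved, stated in full; the proofs are below) =====
def Claim_equal_create_consensus_sequence_py : Prop := ∀ (sequences : List String), Dom_create_consensus_sequence_py sequences → Spec_create_consensus_sequence_py sequences (create_consensus_sequence_py sequences)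

-- ===== LEMMAS AND PROOFS =====

theorem length_bumpTable (tbl : List (PySem.Dict Char Int)) (cs : List Char) :
    (bumpTable tbl cs).length = tbl.length := by
  induction tbl generalizing cs with
  | nil => cases cs <;> simp [bumpTable]
  | cons d ds ih => cases cs <;> simp [bumpTable, ih]

theorem getD_bumpTable (tbl : List (PySem.Dict Char Int)) (cs : List Char) (p : Nat)
    (hp : p < tbl.length) (hc : tbl.length ≤ cs.length) :
    (bumpTable tbl cs).getD p PySem.Dict.empty
      = bumpRow (tbl.getD p PySem.Dict.empty) (cs.getD p ' ') := by
  induction tbl generalizing cs p with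
  | nil => simp at hp
  | cons d ds ih =>
    cases cs with
    | nil => simp at hc
    | cons c cs' =>
      cases p with
      | zero => simp [bumpTable]
      | succ q =>
        simp only [bumpTable, List.getD_cons_succ]
        exact ih cs' q (by simpa using hp) (by simpa using hc)

theorem length_foldl_bumpTable (ss : List String) (tbl : List (PySem.Dict Char Int)) :
    (ss.foldl (fun tbl seq => bumpTable tbl seq.toList) tbl).length = tbl.length := by
  induction ss generalizing tbl with
  | nil => rfl
  | cons t ss ih => simp [List.foldl_cons, ih, length_bumpTable]

theorem getD_foldl_bumpTable (css : List (List Char)) (tbl : List (PySem.Dict Char Int)) (p : Nat)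
    (hp : p < tbl.length) (hlen : ∀ cs ∈ css, tbl.length ≤ cs.length) :
    (css.foldl bumpTable tbl).getD p PySem.Dict.empty
      = (css.map (fun cs => cs.getD p ' ')).foldl bumpRow (tbl.getD p PySem.Dict.empty) := by
  induction css generalizing tbl with
  | nil => rfl
  | cons cs css ih =>
    simp only [List.foldl_cons, List.map_cons]
    rw [ih (bumpTable tbl cs) ((length_bumpTable tbl cs).symm ▸ hp)
          (fun c hc => (length_bumpTable tbl cs) ▸ hlen c (List.mem_cons_of_mem _ hc)),
        getD_bumpTable tbl cs p hp (hlen cs (List.mem_cons_self ..))]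

-- the two column folds build the same dict: both are Counter(column)
theorem col_fold_counter (col : List Char) :
    List.foldl bumpRow PySem.Dict.empty col = PySem.Dict.counter col :=
  PySem.Dict.foldl_insert_getD_add_one_eq_counter col

-- ===== VERDICT (by name: the statement is the Claim_ definition above) =====
theorem create_consensus_sequence_py_spec : Claim_equal_create_consensus_sequence_py := by
  intro sequences _
  unfold Spec_create_consensus_sequence_py create_consensus_sequence_py create_consensus_sequence_py_alt
  cases sequences with
  | nil => rfl
  | cons s rest =>
    rw [if_neg (List.cons_ne_nil s rest)]
    set n := (PySem.List.min? ((s :: rest).map (fun s => s.toList.length)) (fun x => x)).getD 0 with hn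
    have hmin : ∀ t ∈ s :: rest, n ≤ t.toList.length := by
      intro t ht
      rcases h : PySem.List.min? ((s :: rest).map (fun s => s.toList.length)) (fun x => x) with _ | m
      · exact absurd ((PySem.List.min?_eq_none_iff _ _).mp h) (by simp)
      · have hle := PySem.List.min?_isMin h t.toList.length (List.mem_map_of_mem ht)
        rw [hn, h]
        exact hle
    dsimp only
    rw [PySem.List.foldl_append_singleton_eq_map]
    refine congrArg String.mk ?_
    simp only [List.nil_append]
    apply List.ext_getElem
    · simp only [List.length_map, List.length_range]
      rw [length_foldl_bumpTable, List.length_replicate]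
    · intro p h1 h2
      have hpn : p < n := by simpa using h1
      have hcount : ((s :: rest).foldl (fun tbl seq => bumpTable tbl seq.toList)
            (List.replicate n PySem.Dict.empty)).getD p PySem.Dict.empty
          = ((s :: rest).map (fun seq => seq.toList.getD p ' ')).foldl bumpRow PySem.Dict.empty := by
        have htbl : ∀ cs ∈ (s :: rest).map String.toList,
            (List.replicate n (PySem.Dict.empty : PySem.Dict Char Int)).length ≤ cs.length := by
          intro cs hcs
          simp only [List.mem_map] at hcs
          obtain ⟨t, ht, rfl⟩ := hcs
          simpa using hmin t ht
        have := getD_foldl_bumpTable ((s :: rest).map String.toList)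
            (List.replicate n PySem.Dict.empty) p (by simpa using hpn) htbl
        simpa [List.foldl_map, List.map_map, Function.comp, List.getD_eq_getElem, hpn] using this
      have hplt : p < ((s :: rest).foldl (fun tbl seq => bumpTable tbl seq.toList)
            (List.replicate n PySem.Dict.empty)).length := by
        rw [length_foldl_bumpTable, List.length_replicate]; exact hpn
      rw [List.getElem_map, List.getElem_range, List.getElem_map,
          ← List.getD_eq_getElem _ PySem.Dict.empty hplt, hcount, col_fold_counter,
          PySem.Dict.counter_eq_foldl]
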